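-- pv_equiv track=rewrite | github.com/Crosticio/selenium | test_anuncios.py | cards_ad
-- ===== SOURCE A (Python) =====
-- def cards_ad(cards_len, num_group, pos_ad, pos_ad_fw):
--   def next_pos_ad(arr):
--       return arr[len(arr) - 1] + num_group
--   ele_ad = {
--       "ad" : [pos_ad],
--       "ad_fw" : [pos_ad_fw]
--   }
--   limit = int(cards_len / num_group)
--   i = 1
--   while i < limit:
--       ad = ele_ad["ad"]
--       ele_ad["ad"].append(next_pos_ad(ad))
--       ad_fw = ele_ad["ad_fw"]
--       ele_ad["ad_fw"].append(next_pos_ad(ad_fw))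
--       i = i + 1
--   return ele_ad
-- ===== SOURCE B (Python) =====
-- def cards_ad(cards_len, num_group, pos_ad, pos_ad_fw):
--     # closed form: positions are an arithmetic progression, computed by index
--     limit = int(cards_len / num_group)
--     n = max(limit, 1)
--     return {
--         "ad": [pos_ad + k * num_group for k in range(n)],
--         "ad_fw": [pos_ad_fw + k * num_group for k in range(n)],
--     }
-- ===== Notes on version B (the rewrite author's own statement) =====
-- stated objective: simpler
-- what changed: Replaces the stateful while-loop that repeatedly reads each list's last element and appends to it with a direct closed-form arithmetic-progression comprehension indexed by k.
import Mathlib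
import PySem

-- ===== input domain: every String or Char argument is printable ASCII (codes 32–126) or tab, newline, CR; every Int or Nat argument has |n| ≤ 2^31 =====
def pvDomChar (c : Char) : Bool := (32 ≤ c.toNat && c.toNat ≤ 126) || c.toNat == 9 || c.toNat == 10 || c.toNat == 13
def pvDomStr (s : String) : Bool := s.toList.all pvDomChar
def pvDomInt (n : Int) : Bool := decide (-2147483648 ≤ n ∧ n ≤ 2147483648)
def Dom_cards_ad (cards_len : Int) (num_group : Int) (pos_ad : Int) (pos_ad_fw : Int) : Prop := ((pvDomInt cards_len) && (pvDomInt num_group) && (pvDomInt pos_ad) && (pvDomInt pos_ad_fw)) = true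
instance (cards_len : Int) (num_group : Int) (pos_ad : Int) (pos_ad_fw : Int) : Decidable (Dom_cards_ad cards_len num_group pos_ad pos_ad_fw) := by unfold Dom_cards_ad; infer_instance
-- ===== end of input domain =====

-- B replaces A's stateful "append last+num_group" while-loop with a closed-form
-- arithmetic-progression comprehension (objective: simpler).

-- ===== PORT A =====
-- the while loop: i counts 1,2,… while i < limit, i.e. (limit-1).toNat iterations;
-- each step reads arr[len(arr)-1] (next_pos_ad) and appends
def cardsLoopA (num_group : Int) : Nat → List Int → List Int → (List Int × List Int)
  | 0, ad, ad_fw => (ad, ad_fw)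
  | n + 1, ad, ad_fw =>
      let a := (PySem.List.pyGet? ad ((ad.length : Int) - 1)).getD 0 + num_group
      let f := (PySem.List.pyGet? ad_fw ((ad_fw.length : Int) - 1)).getD 0 + num_group
      cardsLoopA num_group n (ad ++ [a]) (ad_fw ++ [f])

def cards_ad (cards_len : Int) (num_group : Int) (pos_ad : Int) (pos_ad_fw : Int) : List (String × List Int) :=
  -- int(cards_len / num_group): on Dom (|args| ≤ 2^31) the float division is exact
  -- enough that truncation toward zero equals Int.tdiv
  let limit := cards_len.tdiv num_group
  let r := cardsLoopA num_group (limit - 1).toNat [pos_ad] [pos_ad_fw]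
  [("ad", r.1), ("ad_fw", r.2)]

-- ===== PORT B =====
def cards_ad_alt (cards_len : Int) (num_group : Int) (pos_ad : Int) (pos_ad_fw : Int) : List (String × List Int) :=
  let limit := cards_len.tdiv num_group
  let n := max limit 1
  [("ad", (List.range n.toNat).map (fun k : Nat => pos_ad + (k : Int) * num_group)),
   ("ad_fw", (List.range n.toNat).map (fun k : Nat => pos_ad_fw + (k : Int) * num_group))]

-- ===== PRECONDITION & SPEC =====
-- Pre_ excludes num_group = 0, on which A raises ZeroDivisionError
def Pre_cards_ad (cards_len : Int) (num_group : Int) (pos_ad : Int) (pos_ad_fw : Int) : Prop := num_group ≠ 0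
instance (cards_len : Int) (num_group : Int) (pos_ad : Int) (pos_ad_fw : Int) : Decidable (Pre_cards_ad cards_len num_group pos_ad pos_ad_fw) := by unfold Pre_cards_ad; infer_instance
def pvWitness_cards_ad : Int × Int × Int × Int := (10, 3, 2, 0)

def Spec_cards_ad (cards_len : Int) (num_group : Int) (pos_ad : Int) (pos_ad_fw : Int) (out : List (String × List Int)) : Prop := out = cards_ad_alt cards_len num_group pos_ad pos_ad_fw
instance (cards_len : Int) (num_group : Int) (pos_ad : Int) (pos_ad_fw : Int) (out : List (String × List Int)) : Decidable (Spec_cards_ad cards_len num_group pos_ad pos_ad_fw out) := by unfold Spec_cards_ad; infer_instance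

-- ===== CLAIM (what is proved, stated in full; the proofs are below) =====
def Claim_equal_cards_ad : Prop := ∀ (cards_len : Int) (num_group : Int) (pos_ad : Int) (pos_ad_fw : Int), Dom_cards_ad cards_len num_group pos_ad pos_ad_fw → Pre_cards_ad cards_len num_group pos_ad pos_ad_fw → Spec_cards_ad cards_len num_group pos_ad pos_ad_fw (cards_ad cards_len num_group pos_ad pos_ad_fw)

-- ===== LEMMAS AND PROOFS =====

-- the loop invariant: starting from the first m terms of the progression (m ≥ 1),
-- n more iterations yield the first m+n terms
theorem cardsLoopA_map_range (g p q : Int) :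
    ∀ (n m : Nat), 1 ≤ m →
    cardsLoopA g n ((List.range m).map (fun k : Nat => p + (k : Int) * g))
                   ((List.range m).map (fun k : Nat => q + (k : Int) * g))
      = ((List.range (m + n)).map (fun k : Nat => p + (k : Int) * g),
         (List.range (m + n)).map (fun k : Nat => q + (k : Int) * g)) := by
  intro n
  induction n with
  | zero => intro m hm; simp [cardsLoopA]
  | succ n ih =>
      intro m hm
      have hlen : ∀ (r : Int), ((List.range m).map (fun k : Nat => r + (k : Int) * g)).length = m := by
        intro r; simp
      have hget : ∀ (r : Int),
          (PySem.List.pyGet? ((List.range m).map (fun k : Nat => r + (k : Int) * g))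
            ((((List.range m).map (fun k : Nat => r + (k : Int) * g)).length : Int) - 1)).getD 0
          = r + ((m : Int) - 1) * g := by
        intro r
        rw [hlen, show ((m : Int) - 1) = ((m - 1 : Nat) : Int) by omega,
            PySem.List.pyGet?_natCast]
        have hlt : m - 1 < m := by omega
        simp [hlt]
      have hstep : ∀ (r : Int),
          (List.range m).map (fun k : Nat => r + (k : Int) * g) ++ [r + ((m : Int) - 1) * g + g]
          = (List.range (m + 1)).map (fun k : Nat => r + (k : Int) * g) := by
        intro r
        rw [List.range_succ, List.map_append]
        simp
        ring
      show cardsLoopA g n _ _ = _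
      rw [hget p, hget q, hstep p, hstep q, ih (m+1) (by omega)]
      rw [show m + 1 + n = m + (n + 1) by omega]

-- ===== VERDICT (by name: the statement is the Claim_ definition above) =====
theorem cards_ad_spec : Claim_equal_cards_ad := by
  intro cards_len num_group pos_ad pos_ad_fw _ _
  unfold Spec_cards_ad
  simp only [cards_ad, cards_ad_alt]
  have hrng : ∀ (r : Int), [r] = (List.range 1).map (fun k : Nat => r + (k : Int) * num_group) := by
    intro r; simp [List.range_succ]
  rw [hrng pos_ad, hrng pos_ad_fw,
      cardsLoopA_map_range num_group pos_ad pos_ad_fw ((cards_len.tdiv num_group - 1).toNat) 1 (le_refl 1),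
      show 1 + (cards_len.tdiv num_group - 1).toNat = (max (cards_len.tdiv num_group) 1).toNat by omega]
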